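-- pv_equiv track=rewrite | github.com/brothertonhistory-rgb/basketballgame | transfer_portal.py | _get_positional_needs
-- ===== SOURCE A (Python) =====
-- def _get_positional_needs(program):
--     """
--     Returns a dict of positional need scores.
--     Higher = more urgent need at that position.
--     0 = position is full (3+ players)
--     1 = light (2 players)
--     2 = thin (1 player)
--     3 = emergency (0 players)
--     """
--     roster = program.get("roster", [])
--     pos_counts = {"PG": 0, "SG": 0, "SF": 0, "PF": 0, "C": 0}
--     for p in roster:
--         pos = p.get("position", "SF")
--         if pos in pos_counts:
--             pos_counts[pos] += 1
--
--     needs = {}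
--     for pos, count in pos_counts.items():
--         if count == 0:   needs[pos] = 3
--         elif count == 1: needs[pos] = 2
--         elif count == 2: needs[pos] = 1
--         else:            needs[pos] = 0
--     return needs
-- ===== SOURCE B (Python) =====
-- def _get_positional_needs(program):
--     """Single pass: maintain need scores directly, decrementing (floored at 0)
--     for each rostered player, instead of counting then mapping."""
--     needs = {"PG": 3, "SG": 3, "SF": 3, "PF": 3, "C": 3}
--     for p in program.get("roster", []):
--         pos = p.get("position", "SF")
--         if pos in needs and needs[pos] > 0:
--             needs[pos] -= 1
--     return needs
-- ===== Notes on version B (the rewrite author's own statement) =====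
-- stated objective: simpler
-- what changed: Replaces A's two-phase count-then-map (build a pos_counts dict over the roster, then a second loop translating each count into a need score) with a single pass that maintains the need scores directly, decrementing the matching score with a >0 floor; the intermediate counts dict and the mapping loop disappear.
import Mathlib
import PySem

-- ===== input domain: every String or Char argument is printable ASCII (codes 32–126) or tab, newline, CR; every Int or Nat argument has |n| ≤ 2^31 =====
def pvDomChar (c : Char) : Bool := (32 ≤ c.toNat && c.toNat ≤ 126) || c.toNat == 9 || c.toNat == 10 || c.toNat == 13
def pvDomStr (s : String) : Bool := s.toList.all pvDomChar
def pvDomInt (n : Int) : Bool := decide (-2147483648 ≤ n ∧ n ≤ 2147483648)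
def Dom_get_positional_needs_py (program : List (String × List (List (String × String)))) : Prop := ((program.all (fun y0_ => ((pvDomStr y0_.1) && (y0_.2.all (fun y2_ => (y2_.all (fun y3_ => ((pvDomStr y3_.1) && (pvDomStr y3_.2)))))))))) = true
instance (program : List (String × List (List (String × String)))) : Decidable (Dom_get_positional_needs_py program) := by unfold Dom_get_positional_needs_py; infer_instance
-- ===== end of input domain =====

-- B replaces A's count-then-map two-phase computation by a single pass that maintains
-- the need scores directly (decrement with a >0 floor); objective: simpler.

-- ===== PORT A =====
def get_positional_needs_py (program : List (String × List (List (String × String)))) : List (String × Int) :=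
  let roster := PySem.Dict.getD ⟨program⟩ "roster" []
  let pos_counts : PySem.Dict String Int :=
    roster.foldl (fun (pc : PySem.Dict String Int) p =>
      let pos := PySem.Dict.getD ⟨p⟩ "position" "SF"
      if (PySem.Dict.get? pc pos).isSome then pc.modify pos 0 (· + 1) else pc)
      (⟨[("PG", (0:Int)), ("SG", 0), ("SF", 0), ("PF", 0), ("C", 0)]⟩ : PySem.Dict String Int)
  (pos_counts.items.foldl (fun (needs : PySem.Dict String Int) pc =>
      PySem.Dict.insert needs pc.1
        (if pc.2 == 0 then 3 else if pc.2 == 1 then 2 else if pc.2 == 2 then 1 else 0))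
    (⟨[]⟩ : PySem.Dict String Int)).items

-- ===== PORT B =====
def get_positional_needs_py_alt (program : List (String × List (List (String × String)))) : List (String × Int) :=
  let roster := PySem.Dict.getD ⟨program⟩ "roster" []
  (roster.foldl (fun (needs : PySem.Dict String Int) p =>
      let pos := PySem.Dict.getD ⟨p⟩ "position" "SF"
      match PySem.Dict.get? needs pos with
      | some v => if 0 < v then needs.modify pos 0 (· - 1) else needs
      | none => needs)
    (⟨[("PG", 3), ("SG", 3), ("SF", 3), ("PF", 3), ("C", 3)]⟩ : PySem.Dict String Int)).items

-- ===== PRECONDITION & SPEC =====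
def Spec_get_positional_needs_py (program : List (String × List (List (String × String)))) (out : List (String × Int)) : Prop := out = get_positional_needs_py_alt program
instance (program : List (String × List (List (String × String)))) (out : List (String × Int)) : Decidable (Spec_get_positional_needs_py program out) := by unfold Spec_get_positional_needs_py; infer_instance

-- ===== CLAIM (what is proved, stated in full; the proofs are below) =====
def Claim_equal_get_positional_needs_py : Prop := ∀ (program : List (String × List (List (String × String)))), Dom_get_positional_needs_py program → Spec_get_positional_needs_py program (get_positional_needs_py program)

-- ===== LEMMAS AND PROOFS =====

-- A's count→need mapping as a function (the body of A's second loop).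
def pvNeedOf (c : Int) : Int := if c == 0 then 3 else if c == 1 then 2 else if c == 2 then 1 else 0

lemma pvNeedOf_step_pos (a : Int) (_ha : 0 ≤ a) (h : 0 < pvNeedOf a) :
    pvNeedOf a - 1 = pvNeedOf (a + 1) := by
  unfold pvNeedOf at *; simp only [beq_iff_eq] at *; split_ifs at * <;> omega

lemma pvNeedOf_step_zero (a : Int) (ha : 0 ≤ a) (h : ¬ 0 < pvNeedOf a) :
    pvNeedOf a = pvNeedOf (a + 1) := by
  unfold pvNeedOf at *; simp only [beq_iff_eq] at *; split_ifs at * <;> omega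

-- Loop invariant: B's running needs dict is exactly what A's second loop would
-- produce from A's running counts dict.
set_option maxHeartbeats 2000000 in
lemma pv_loop_inv (roster : List (List (String × String))) (a b c d e : Int)
    (ha : 0 ≤ a) (hb : 0 ≤ b) (hc : 0 ≤ c) (hd : 0 ≤ d) (he : 0 ≤ e) :
    roster.foldl (fun (needs : PySem.Dict String Int) p =>
        let pos := PySem.Dict.getD ⟨p⟩ "position" "SF"
        match PySem.Dict.get? needs pos with
        | some v => if 0 < v then needs.modify pos 0 (· - 1) else needs
        | none => needs)
      (⟨[("PG", pvNeedOf a), ("SG", pvNeedOf b), ("SF", pvNeedOf c), ("PF", pvNeedOf d), ("C", pvNeedOf e)]⟩ : PySem.Dict String Int)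
    = (roster.foldl (fun (pc : PySem.Dict String Int) p =>
          let pos := PySem.Dict.getD ⟨p⟩ "position" "SF"
          if (PySem.Dict.get? pc pos).isSome then pc.modify pos 0 (· + 1) else pc)
        (⟨[("PG", a), ("SG", b), ("SF", c), ("PF", d), ("C", e)]⟩ : PySem.Dict String Int)).items.foldl
        (fun (needs : PySem.Dict String Int) pc =>
          PySem.Dict.insert needs pc.1
            (if pc.2 == 0 then 3 else if pc.2 == 1 then 2 else if pc.2 == 2 then 1 else 0))
        (⟨[]⟩ : PySem.Dict String Int) := by
  induction roster generalizing a b c d e with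
  | nil =>
      simp [PySem.Dict.insert, PySem.Dict.contains, pvNeedOf]
  | cons p rest ih =>
      rw [List.foldl_cons, List.foldl_cons]
      generalize PySem.Dict.getD ⟨p⟩ "position" "SF" = pos
      by_cases h1 : pos = "PG"
      · subst h1
        have hgB : PySem.Dict.get? (⟨[("PG", pvNeedOf a), ("SG", pvNeedOf b), ("SF", pvNeedOf c), ("PF", pvNeedOf d), ("C", pvNeedOf e)]⟩ : PySem.Dict String Int) "PG" = some (pvNeedOf a) := rfl
        have hgA : (PySem.Dict.get? (⟨[("PG", a), ("SG", b), ("SF", c), ("PF", d), ("C", e)]⟩ : PySem.Dict String Int) "PG").isSome = true := rfl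
        have hmB : PySem.Dict.modify (⟨[("PG", pvNeedOf a), ("SG", pvNeedOf b), ("SF", pvNeedOf c), ("PF", pvNeedOf d), ("C", pvNeedOf e)]⟩ : PySem.Dict String Int) "PG" 0 (· - 1) = (⟨[("PG", pvNeedOf a - 1), ("SG", pvNeedOf b), ("SF", pvNeedOf c), ("PF", pvNeedOf d), ("C", pvNeedOf e)]⟩ : PySem.Dict String Int) := rfl
        have hmA : PySem.Dict.modify (⟨[("PG", a), ("SG", b), ("SF", c), ("PF", d), ("C", e)]⟩ : PySem.Dict String Int) "PG" 0 (· + 1) = (⟨[("PG", a + 1), ("SG", b), ("SF", c), ("PF", d), ("C", e)]⟩ : PySem.Dict String Int) := rfl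
        simp only [hgB, hgA, if_true, hmB, hmA]
        split_ifs with hp
        · rw [pvNeedOf_step_pos a ha hp]
          exact ih (a + 1) b c d e (by omega) hb hc hd he
        · rw [pvNeedOf_step_zero a ha hp]
          exact ih (a + 1) b c d e (by omega) hb hc hd he
      by_cases h2 : pos = "SG"
      · subst h2
        have hgB : PySem.Dict.get? (⟨[("PG", pvNeedOf a), ("SG", pvNeedOf b), ("SF", pvNeedOf c), ("PF", pvNeedOf d), ("C", pvNeedOf e)]⟩ : PySem.Dict String Int) "SG" = some (pvNeedOf b) := rfl
        have hgA : (PySem.Dict.get? (⟨[("PG", a), ("SG", b), ("SF", c), ("PF", d), ("C", e)]⟩ : PySem.Dict String Int) "SG").isSome = true := rfl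
        have hmB : PySem.Dict.modify (⟨[("PG", pvNeedOf a), ("SG", pvNeedOf b), ("SF", pvNeedOf c), ("PF", pvNeedOf d), ("C", pvNeedOf e)]⟩ : PySem.Dict String Int) "SG" 0 (· - 1) = (⟨[("PG", pvNeedOf a), ("SG", pvNeedOf b - 1), ("SF", pvNeedOf c), ("PF", pvNeedOf d), ("C", pvNeedOf e)]⟩ : PySem.Dict String Int) := rfl
        have hmA : PySem.Dict.modify (⟨[("PG", a), ("SG", b), ("SF", c), ("PF", d), ("C", e)]⟩ : PySem.Dict String Int) "SG" 0 (· + 1) = (⟨[("PG", a), ("SG", b + 1), ("SF", c), ("PF", d), ("C", e)]⟩ : PySem.Dict String Int) := rfl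
        simp only [hgB, hgA, if_true, hmB, hmA]
        split_ifs with hp
        · rw [pvNeedOf_step_pos b hb hp]
          exact ih a (b + 1) c d e ha (by omega) hc hd he
        · rw [pvNeedOf_step_zero b hb hp]
          exact ih a (b + 1) c d e ha (by omega) hc hd he
      by_cases h3 : pos = "SF"
      · subst h3
        have hgB : PySem.Dict.get? (⟨[("PG", pvNeedOf a), ("SG", pvNeedOf b), ("SF", pvNeedOf c), ("PF", pvNeedOf d), ("C", pvNeedOf e)]⟩ : PySem.Dict String Int) "SF" = some (pvNeedOf c) := rfl
        have hgA : (PySem.Dict.get? (⟨[("PG", a), ("SG", b), ("SF", c), ("PF", d), ("C", e)]⟩ : PySem.Dict String Int) "SF").isSome = true := rfl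
        have hmB : PySem.Dict.modify (⟨[("PG", pvNeedOf a), ("SG", pvNeedOf b), ("SF", pvNeedOf c), ("PF", pvNeedOf d), ("C", pvNeedOf e)]⟩ : PySem.Dict String Int) "SF" 0 (· - 1) = (⟨[("PG", pvNeedOf a), ("SG", pvNeedOf b), ("SF", pvNeedOf c - 1), ("PF", pvNeedOf d), ("C", pvNeedOf e)]⟩ : PySem.Dict String Int) := rfl
        have hmA : PySem.Dict.modify (⟨[("PG", a), ("SG", b), ("SF", c), ("PF", d), ("C", e)]⟩ : PySem.Dict String Int) "SF" 0 (· + 1) = (⟨[("PG", a), ("SG", b), ("SF", c + 1), ("PF", d), ("C", e)]⟩ : PySem.Dict String Int) := rfl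
        simp only [hgB, hgA, if_true, hmB, hmA]
        split_ifs with hp
        · rw [pvNeedOf_step_pos c hc hp]
          exact ih a b (c + 1) d e ha hb (by omega) hd he
        · rw [pvNeedOf_step_zero c hc hp]
          exact ih a b (c + 1) d e ha hb (by omega) hd he
      by_cases h4 : pos = "PF"
      · subst h4
        have hgB : PySem.Dict.get? (⟨[("PG", pvNeedOf a), ("SG", pvNeedOf b), ("SF", pvNeedOf c), ("PF", pvNeedOf d), ("C", pvNeedOf e)]⟩ : PySem.Dict String Int) "PF" = some (pvNeedOf d) := rfl
        have hgA : (PySem.Dict.get? (⟨[("PG", a), ("SG", b), ("SF", c), ("PF", d), ("C", e)]⟩ : PySem.Dict String Int) "PF").isSome = true := rfl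
        have hmB : PySem.Dict.modify (⟨[("PG", pvNeedOf a), ("SG", pvNeedOf b), ("SF", pvNeedOf c), ("PF", pvNeedOf d), ("C", pvNeedOf e)]⟩ : PySem.Dict String Int) "PF" 0 (· - 1) = (⟨[("PG", pvNeedOf a), ("SG", pvNeedOf b), ("SF", pvNeedOf c), ("PF", pvNeedOf d - 1), ("C", pvNeedOf e)]⟩ : PySem.Dict String Int) := rfl
        have hmA : PySem.Dict.modify (⟨[("PG", a), ("SG", b), ("SF", c), ("PF", d), ("C", e)]⟩ : PySem.Dict String Int) "PF" 0 (· + 1) = (⟨[("PG", a), ("SG", b), ("SF", c), ("PF", d + 1), ("C", e)]⟩ : PySem.Dict String Int) := rfl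
        simp only [hgB, hgA, if_true, hmB, hmA]
        split_ifs with hp
        · rw [pvNeedOf_step_pos d hd hp]
          exact ih a b c (d + 1) e ha hb hc (by omega) he
        · rw [pvNeedOf_step_zero d hd hp]
          exact ih a b c (d + 1) e ha hb hc (by omega) he
      by_cases h5 : pos = "C"
      · subst h5
        have hgB : PySem.Dict.get? (⟨[("PG", pvNeedOf a), ("SG", pvNeedOf b), ("SF", pvNeedOf c), ("PF", pvNeedOf d), ("C", pvNeedOf e)]⟩ : PySem.Dict String Int) "C" = some (pvNeedOf e) := rfl
        have hgA : (PySem.Dict.get? (⟨[("PG", a), ("SG", b), ("SF", c), ("PF", d), ("C", e)]⟩ : PySem.Dict String Int) "C").isSome = true := rfl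
        have hmB : PySem.Dict.modify (⟨[("PG", pvNeedOf a), ("SG", pvNeedOf b), ("SF", pvNeedOf c), ("PF", pvNeedOf d), ("C", pvNeedOf e)]⟩ : PySem.Dict String Int) "C" 0 (· - 1) = (⟨[("PG", pvNeedOf a), ("SG", pvNeedOf b), ("SF", pvNeedOf c), ("PF", pvNeedOf d), ("C", pvNeedOf e - 1)]⟩ : PySem.Dict String Int) := rfl
        have hmA : PySem.Dict.modify (⟨[("PG", a), ("SG", b), ("SF", c), ("PF", d), ("C", e)]⟩ : PySem.Dict String Int) "C" 0 (· + 1) = (⟨[("PG", a), ("SG", b), ("SF", c), ("PF", d), ("C", e + 1)]⟩ : PySem.Dict String Int) := rfl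
        simp only [hgB, hgA, if_true, hmB, hmA]
        split_ifs with hp
        · rw [pvNeedOf_step_pos e he hp]
          exact ih a b c d (e + 1) ha hb hc hd (by omega)
        · rw [pvNeedOf_step_zero e he hp]
          exact ih a b c d (e + 1) ha hb hc hd (by omega)
      · have g1 : ("PG" == pos) = false := beq_eq_false_iff_ne.mpr (fun h => h1 h.symm)
        have g2 : ("SG" == pos) = false := beq_eq_false_iff_ne.mpr (fun h => h2 h.symm)
        have g3 : ("SF" == pos) = false := beq_eq_false_iff_ne.mpr (fun h => h3 h.symm)
        have g4 : ("PF" == pos) = false := beq_eq_false_iff_ne.mpr (fun h => h4 h.symm)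
        have g5 : ("C" == pos) = false := beq_eq_false_iff_ne.mpr (fun h => h5 h.symm)
        have hgB : PySem.Dict.get? (⟨[("PG", pvNeedOf a), ("SG", pvNeedOf b), ("SF", pvNeedOf c), ("PF", pvNeedOf d), ("C", pvNeedOf e)]⟩ : PySem.Dict String Int) pos = none := by
          simp [PySem.Dict.get?, List.find?, g1, g2, g3, g4, g5]
        have hgA : PySem.Dict.get? (⟨[("PG", a), ("SG", b), ("SF", c), ("PF", d), ("C", e)]⟩ : PySem.Dict String Int) pos = none := by
          simp [PySem.Dict.get?, List.find?, g1, g2, g3, g4, g5]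
        simp only [hgB, hgA, Option.isSome_none, Bool.false_eq_true, if_false]
        exact ih a b c d e ha hb hc hd he

-- ===== VERDICT (by name: the statement is the Claim_ definition above) =====
theorem get_positional_needs_py_spec : Claim_equal_get_positional_needs_py := by
  intro program _
  unfold Spec_get_positional_needs_py get_positional_needs_py get_positional_needs_py_alt
  have h := pv_loop_inv (PySem.Dict.getD ⟨program⟩ "roster" []) 0 0 0 0 0
    le_rfl le_rfl le_rfl le_rfl le_rfl
  rw [show pvNeedOf 0 = 3 from rfl] at h
  exact congrArg PySem.Dict.items h.symm
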